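-- pv_equiv track=rewrite | github.com/yeshks/applied-crypto | ExamplePaperProblem.py | make_one_encoding
-- ===== SOURCE A (Python) =====
-- def make_one_encoding(x, padding=256):
--     x = bin(x)[2:].zfill(padding)  # Pad the binary integer
--     x = x[::-1]  # Reverse the binary integer so the order stays as per the formula specified in the paper
--     one_encoding = set()  # Initialize an empty set
--     for i in range(len(x)):
--         if x[i] == '1':
--             if x[i + 1:] == '0' * len(x[i + 1:]):
--                 break
--             element = x[i:]
--             element = element[::-1]
--             one_encoding.add(int(element, 2))
--     return one_encoding  # Return the set
-- ===== SOURCE B (Python) =====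
-- def make_one_encoding(x, padding=256):
--     # Kernighan bit-clearing walk: visit only the SET bits of x, lowest first.
--     # y & (y - 1) clears the lowest set bit; while that is nonzero, y still has
--     # a set bit above, so the suffix value x >> i (i = position of the lowest
--     # set bit, recovered from the XOR of y with the cleared value) belongs to
--     # the encoding; the top set bit is exactly where the loop stops.
--     # padding only prepends zeros to A's string and never changes the result.
--     one_encoding = set()
--     y = x
--     while y & (y - 1):
--         z = y & (y - 1)                 # y with its lowest set bit cleared
--         i = (y ^ z).bit_length() - 1    # position of that lowest set bit
--         one_encoding.add(x >> i)
--         y = z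
--     return one_encoding
-- ===== Notes on version B (the rewrite author's own statement) =====
-- stated objective: faster
-- what changed: Replaces the padded-binary-string construction with quadratic suffix comparisons, slicing and re-parsing by a Kernighan bit-clearing loop (y &= y-1) that visits only the set bits of x and emits x>>i for each set bit below the top one.
import Mathlib
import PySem

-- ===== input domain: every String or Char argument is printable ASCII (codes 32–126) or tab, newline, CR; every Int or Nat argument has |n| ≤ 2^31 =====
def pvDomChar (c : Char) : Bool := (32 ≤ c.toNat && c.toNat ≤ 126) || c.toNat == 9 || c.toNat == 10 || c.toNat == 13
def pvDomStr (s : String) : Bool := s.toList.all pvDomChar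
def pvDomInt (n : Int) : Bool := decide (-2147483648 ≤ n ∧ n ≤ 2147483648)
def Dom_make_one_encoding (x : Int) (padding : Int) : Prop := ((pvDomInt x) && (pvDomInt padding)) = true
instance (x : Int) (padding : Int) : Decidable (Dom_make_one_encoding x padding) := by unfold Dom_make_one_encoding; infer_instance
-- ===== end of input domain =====

-- B replaces A's padded-binary-string suffix scanning by a lowest-set-bit clearing loop over the set bits only (faster; A raises ValueError on x < 0, excluded by Pre_).

-- ===== PORT A =====

-- binary digits of a natural number, least-significant bit first ('' for 0)
def pvBinRev : Nat → List Char
  | 0 => []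
  | n + 1 => (if (n + 1) % 2 = 1 then '1' else '0') :: pvBinRev ((n + 1) / 2)
decreasing_by exact Nat.div_lt_self (Nat.succ_pos n) (by omega)

-- bin(x)[2:] : for x ≥ 0 the binary digits MSB first ('0' for 0); for x < 0 Python leaves 'b' ++ digits
def pvPyBin (x : Int) : List Char :=
  if x < 0 then 'b' :: (pvBinRev x.natAbs).reverse
  else if x = 0 then ['0'] else (pvBinRev x.toNat).reverse

-- s.zfill(w) (our strings never start with a sign, so plain left-padding with '0' is exact)
def pvZfill (s : List Char) (w : Int) : List Char :=
  List.replicate (w - (s.length : Int)).toNat '0' ++ s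

-- int(element, 2) : none = ValueError (element here is built only from '0'/'1'/'b')
def pvInt2? (s : List Char) : Option Int :=
  if s ≠ [] ∧ s.all (fun c => c = '0' ∨ c = '1') then
    some (s.foldl (fun a c => 2 * a + (if c = '1' then 1 else 0)) 0)
  else none

-- the for-loop with break; the argument list is the current suffix x[i:]; none = the ValueError path
def pvLoopA : List Char → PySem.Set Int → Option (PySem.Set Int)
  | [], s => some s
  | c :: rest, s =>
    if c = '1' then
      if rest.all (fun d => d = '0') then some s
      else
        match pvInt2? ((c :: rest).reverse) with
        | some v => pvLoopA rest (PySem.Set.add s v)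
        | none => none
    else pvLoopA rest s

def make_one_encoding (x : Int) (padding : Int) : List Int :=
  ((pvLoopA (pvZfill (pvPyBin x) padding).reverse PySem.Set.empty).getD PySem.Set.empty)

-- ===== PORT B =====

-- while y & (y - 1): z = y & (y-1); i = (y ^ z).bit_length() - 1; add x >> i; y = z
-- (the '0 < y' conjunct only makes the recursion total: for y < 0 the Python loop never
-- terminates, which is outside Pre_; for y ≥ 0 the conjunct is implied by the Python test)
def pvLoopK (x y : Int) (s : PySem.Set Int) : PySem.Set Int :=
  if _h : 0 < y ∧ PySem.Int.band y (y - 1) ≠ 0 then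
    pvLoopK x (PySem.Int.band y (y - 1))
      (PySem.Set.add s (x >>> (PySem.Int.bitLength (PySem.Int.bxor y (PySem.Int.band y (y - 1))) - 1)))
  else s
termination_by y.toNat
decreasing_by
  rw [PySem.Int.band_of_nonneg (by omega) (by omega : (0:Int) ≤ y - 1)]
  have hle := Nat.and_le_right (n := y.toNat) (m := (y - 1).toNat)
  simp only [Int.toNat_natCast]
  omega

def make_one_encoding_alt (x : Int) (padding : Int) : List Int :=
  pvLoopK x x PySem.Set.empty

-- ===== PRECONDITION & SPEC =====
-- Pre_ excludes exactly x < 0, on which Python A raises ValueError (int(element, 2) sees the 'b' of bin(x)).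
def Pre_make_one_encoding (x : Int) (padding : Int) : Prop := 0 ≤ x
instance (x : Int) (padding : Int) : Decidable (Pre_make_one_encoding x padding) := by unfold Pre_make_one_encoding; infer_instance
def pvWitness_make_one_encoding : Int × Int := (13, 8)

def Spec_make_one_encoding (x : Int) (padding : Int) (out : List Int) : Prop := out = make_one_encoding_alt x padding
instance (x : Int) (padding : Int) (out : List Int) : Decidable (Spec_make_one_encoding x padding out) := by unfold Spec_make_one_encoding; infer_instance

-- ===== CLAIM (what is proved, stated in full; the proofs are below) =====
def Claim_equal_make_one_encoding : Prop := ∀ (x : Int) (padding : Int), Dom_make_one_encoding x padding → Pre_make_one_encoding x padding → Spec_make_one_encoding x padding (make_one_encoding x padding)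

-- ===== LEMMAS AND PROOFS =====

-- proof-side mediator: the plain LSB-to-MSB shift walk that A's string loop follows
def pvShiftLoop (y : Int) (s : PySem.Set Int) : PySem.Set Int :=
  if _h : 1 < y then
    pvShiftLoop (PySem.Int.floordiv y 2)
      (if PySem.Int.mod y 2 = 1 then PySem.Set.add s y else s)
  else s
termination_by y.toNat
decreasing_by
  have h2 : PySem.Int.floordiv y 2 = y / 2 := PySem.Int.floordiv_eq_ediv_of_pos (by omega)
  rw [h2]; omega

theorem pvShiftLoop_nat (n : Nat) (hn : 2 ≤ n) (s : PySem.Set Int) :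
    pvShiftLoop (n : Int) s
      = pvShiftLoop ((n / 2 : Nat) : Int) (if n % 2 = 1 then PySem.Set.add s (n : Int) else s) := by
  rw [pvShiftLoop]
  have hgt : (1 : Int) < (n : Int) := by exact_mod_cast hn
  rw [dif_pos hgt]
  have hmod : PySem.Int.mod (n : Int) 2 = ((n % 2 : Nat) : Int) := by
    exact_mod_cast PySem.Int.mod_natCast n 2
  have hfd : PySem.Int.floordiv (n : Int) 2 = ((n / 2 : Nat) : Int) := by
    exact_mod_cast PySem.Int.floordiv_natCast n 2
  rw [hmod, hfd]
  have hiff : (((n % 2 : Nat) : Int) = 1) ↔ (n % 2 = 1) := by omega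
  rw [if_congr hiff rfl rfl]

theorem pvBinRev_valid (n : Nat) : (pvBinRev n).all (fun c => c = '0' ∨ c = '1') = true := by
  induction n using Nat.strong_induction_on with
  | _ n ih =>
    match n with
    | 0 => simp [pvBinRev]
    | Nat.succ m =>
      rw [pvBinRev]
      simp only [List.all_cons, Bool.and_eq_true]
      refine ⟨by split <;> simp, ih _ (Nat.div_lt_self (Nat.succ_pos m) (by omega))⟩

theorem pvBinRev_all_zero (n : Nat) : ((pvBinRev n).all (fun d => d = '0') = true) ↔ n = 0 := by
  induction n using Nat.strong_induction_on with
  | _ n ih =>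
    match n with
    | 0 => simp [pvBinRev]
    | Nat.succ m =>
      rw [pvBinRev]
      simp only [List.all_cons, Bool.and_eq_true]
      constructor
      · rintro ⟨h1, h2⟩
        have hm := (ih _ (Nat.div_lt_self (Nat.succ_pos m) (by omega))).mp h2
        by_cases ho : (m + 1) % 2 = 1
        · simp [ho] at h1
        · omega
      · intro h; exact absurd h (Nat.succ_ne_zero m)

theorem pvFoldVal_zeros (k : Nat) :
    (List.replicate k '0').foldl (fun a c => 2 * a + (if c = '1' then 1 else 0)) (0 : Int) = 0 := by
  induction k with
  | zero => simp
  | succ j ihj => simpa [List.replicate_succ] using ihj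

theorem pvVal_reverse_binRev (n : Nat) :
    ((pvBinRev n).reverse).foldl (fun a c => 2 * a + (if c = '1' then 1 else 0)) 0 = (n : Int) := by
  induction n using Nat.strong_induction_on with
  | _ n ih =>
    match n with
    | 0 => simp [pvBinRev]
    | Nat.succ m =>
      rw [pvBinRev]
      simp only [List.reverse_cons]
      rw [List.foldl_append]
      rw [ih _ (Nat.div_lt_self (Nat.succ_pos m) (by omega))]
      by_cases ho : (m + 1) % 2 = 1
      · have hd : (if (m + 1) % 2 = 1 then '1' else '0') = '1' := by simp [ho]
        rw [hd]
        simp only [List.foldl_cons, List.foldl_nil, if_true]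
        omega
      · have hd : (if (m + 1) % 2 = 1 then '1' else '0') = '0' := by simp [ho]
        rw [hd]
        simp only [List.foldl_cons, List.foldl_nil]
        have hb : (if ('0' : Char) = '1' then (1 : Int) else 0) = 0 := by decide
        rw [hb]
        omega

theorem pvInt2_suffix (n : Nat) (k : Nat) (hn : 0 < n) :
    pvInt2? ((pvBinRev n ++ List.replicate k '0').reverse) = some (n : Int) := by
  unfold pvInt2?
  have hne : pvBinRev n ≠ [] := by
    match n, hn with
    | Nat.succ m, _ => rw [pvBinRev]; simp
  have hvalid : ((pvBinRev n ++ List.replicate k '0').reverse).all (fun c => c = '0' ∨ c = '1') = true := by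
    simp only [List.all_reverse, List.all_append]
    rw [pvBinRev_valid]
    simp [List.all_replicate]
  rw [if_pos]
  · congr 1
    rw [List.reverse_append]
    rw [List.foldl_append]
    rw [List.reverse_replicate, pvFoldVal_zeros, pvVal_reverse_binRev]
  · constructor
    · simp only [ne_eq, List.reverse_eq_nil_iff, List.append_eq_nil_iff]
      intro ⟨h1, _⟩; exact hne h1
    · exact hvalid

theorem pvLoopA_zeros (k : Nat) (s : PySem.Set Int) :
    pvLoopA (List.replicate k '0') s = some s := by
  induction k with
  | zero => simp [pvLoopA]
  | succ j ihj =>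
    rw [List.replicate_succ, pvLoopA, if_neg (by decide)]
    exact ihj

-- A-SIDE MAIN LEMMA: A's loop over the reversed padded string is the shift walk
theorem pvLoop_main (n : Nat) (k : Nat) (s : PySem.Set Int) :
    pvLoopA (pvBinRev n ++ List.replicate k '0') s = some (pvShiftLoop (n : Int) s) := by
  induction n using Nat.strong_induction_on generalizing s with
  | _ n ih =>
    match n with
    | 0 =>
      rw [pvShiftLoop, dif_neg (by norm_num)]
      simpa [pvBinRev] using pvLoopA_zeros k s
    | Nat.succ m =>
      have hdiv : (m + 1) / 2 < m + 1 := Nat.div_lt_self (Nat.succ_pos m) (by omega)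
      simp only [Nat.succ_eq_add_one]
      rw [pvBinRev]
      by_cases ho : (m + 1) % 2 = 1
      · -- odd: digit '1'
        have hd : (if (m + 1) % 2 = 1 then '1' else '0') = '1' := by rw [if_pos ho]
        rw [hd, List.cons_append, pvLoopA, if_pos rfl]
        by_cases hone : (m + 1) / 2 = 0
        · -- n = 1 : break; the shift walk does not run
          have hm0 : m = 0 := by omega
          subst hm0
          rw [if_pos (by simp [pvBinRev, List.all_replicate])]
          rw [pvShiftLoop, dif_neg (by norm_num)]
        · -- n ≥ 3 odd : parse, add, recurse
          have hnz : ¬ ((pvBinRev ((m + 1) / 2) ++ List.replicate k '0').all (fun d => d = '0') = true) := by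
            simp only [List.all_append, Bool.and_eq_true]
            intro ⟨h1, _⟩
            exact hone ((pvBinRev_all_zero _).mp h1)
          rw [if_neg hnz]
          have hparse : pvInt2? (('1' :: (pvBinRev ((m + 1) / 2) ++ List.replicate k '0')).reverse) = some ((m + 1 : Nat) : Int) := by
            have hshape : ('1' :: (pvBinRev ((m + 1) / 2) ++ List.replicate k '0'))
                 = pvBinRev (m + 1) ++ List.replicate k '0' := by
              rw [pvBinRev, hd, List.cons_append]
            rw [hshape]
            exact pvInt2_suffix (m + 1) k (Nat.succ_pos m)
          rw [hparse]
          show pvLoopA (pvBinRev ((m + 1) / 2) ++ List.replicate k '0') (PySem.Set.add s ((m + 1 : Nat) : Int)) = _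
          rw [ih _ hdiv]
          rw [pvShiftLoop_nat (m + 1) (by omega), if_pos ho]
      · -- even: digit '0', skip
        have hd : (if (m + 1) % 2 = 1 then '1' else '0') = '0' := by rw [if_neg ho]
        rw [hd, List.cons_append, pvLoopA, if_neg (by decide)]
        rw [ih _ hdiv s]
        rw [pvShiftLoop_nat (m + 1) (by omega), if_neg ho]

-- the reversed padded string is exactly LSB-first digits followed by zeros (x ≥ 0)
theorem pvString_shape (x : Int) (padding : Int) (hx : 0 ≤ x) :
    ∃ k : Nat, (pvZfill (pvPyBin x) padding).reverse = pvBinRev x.toNat ++ List.replicate k '0' := by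
  unfold pvZfill pvPyBin
  rw [if_neg (by omega)]
  by_cases h0 : x = 0
  · subst h0
    refine ⟨(padding - 1).toNat + 1, ?_⟩
    rw [if_pos rfl]
    simp [pvBinRev, List.reverse_append, List.reverse_replicate, List.replicate_succ]
  · rw [if_neg h0]
    refine ⟨(padding - ((pvBinRev x.toNat).reverse.length : Int)).toNat, ?_⟩
    rw [List.reverse_append, List.reverse_reverse, List.reverse_replicate]

-- ===== B-SIDE bit lemmas =====

-- for odd m, m - 1 is m with bit 0 cleared
theorem pvTestBit_pred_of_odd (m : Nat) (hm : m % 2 = 1) (t : Nat) :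
    (m - 1).testBit t = (decide (t ≠ 0) && m.testBit t) := by
  cases t with
  | zero => simp [Nat.testBit_zero]; omega
  | succ t' =>
    simp only [Nat.testBit_succ]
    have hdiv : (m - 1) / 2 = m / 2 := by omega
    rw [hdiv]
    simp

-- clearing the lowest set bit of 2^k * m (m odd) yields 2^k * (m - 1)
theorem pvLand_pred (k m : Nat) (hm : m % 2 = 1) :
    (2 ^ k * m) &&& (2 ^ k * m - 1) = 2 ^ k * (m - 1) := by
  have hp : 0 < 2 ^ k := Nat.two_pow_pos k
  have hdec : 2 ^ k * m - 1 = 2 ^ k * (m - 1) + (2 ^ k - 1) := by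
    obtain ⟨m', rfl⟩ : ∃ m', m = m' + 1 := ⟨m - 1, by omega⟩
    have h1 : 2 ^ k * (m' + 1) = 2 ^ k * m' + 2 ^ k := by ring
    simp only [Nat.add_sub_cancel]
    omega
  apply Nat.eq_of_testBit_eq
  intro j
  rw [Nat.testBit_land, hdec, Nat.testBit_two_pow_mul_add _ (by omega),
    Nat.testBit_two_pow_mul, Nat.testBit_two_pow_mul]
  by_cases hj : j < k
  · simp [hj, show ¬ (k ≤ j) by omega, Nat.testBit_two_pow_sub_one]
  · push_neg at hj
    rw [if_neg (by omega)]
    rw [pvTestBit_pred_of_odd m hm]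
    by_cases ht : j - k = 0
    · simp [ht, hj]
    · simp [ht, hj, Bool.and_self]

-- the XOR of 2^k * m (m odd) with its lowest-bit-cleared value is the lowest set bit 2^k
theorem pvXor_pred (k m : Nat) (hm : m % 2 = 1) :
    (2 ^ k * m) ^^^ (2 ^ k * (m - 1)) = 2 ^ k := by
  apply Nat.eq_of_testBit_eq
  intro j
  rw [Nat.testBit_xor, Nat.testBit_two_pow_mul, Nat.testBit_two_pow_mul, Nat.testBit_two_pow]
  by_cases hj : j < k
  · simp [show ¬ (k ≤ j) by omega, show ¬ (k = j) by omega]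
  · push_neg at hj
    rw [pvTestBit_pred_of_odd m hm]
    by_cases ht : j - k = 0
    · have hkj : k = j := by omega
      simp [hkj, ht, Nat.testBit_zero, hm]
    · simp [hj, ht, show ¬ (k = j) by omega]

theorem pvBitLength_two_pow (k : Nat) : PySem.Int.bitLength ((2 ^ k : Nat) : Int) = k + 1 := by
  induction k with
  | zero => decide
  | succ j ih =>
    rw [PySem.Int.bitLength_natCast (m := 2 ^ (j + 1)) (by positivity)]
    have h2 : 2 ^ (j + 1) / 2 = 2 ^ j := by
      rw [pow_succ]
      exact Nat.mul_div_cancel _ (by norm_num)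
    rw [h2, ih]

-- shifting one more place halves the witness value
theorem pvShift_step (x : Int) (k : Nat) (m : Nat) (h : x >>> k = (m : Int)) :
    x >>> (k + 1) = ((m / 2 : Nat) : Int) := by
  have h1 : x >>> (k + 1) = (x >>> k) >>> (1 : Nat) := Int.shiftRight_add x k 1
  rw [h1, h]
  have h2 : ((m : Int)) >>> (1 : Nat) = ((m >>> 1 : Nat) : Int) := by exact_mod_cast rfl
  rw [h2, Nat.shiftRight_one]

-- B-SIDE MAIN LEMMA: the bit-clearing walk on 2^k * m (with x >> k = m) is the shift walk on m
theorem pvLoopK_eq (x : Int) (m : Nat) : ∀ (k : Nat) (s : PySem.Set Int), x >>> k = (m : Int) →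
    pvLoopK x (((2 ^ k * m : Nat) : Int)) s = pvShiftLoop ((m : Nat) : Int) s := by
  induction m using Nat.strong_induction_on with
  | _ m ih =>
    intro k s hshift
    match hm0 : m with
    | 0 =>
      rw [pvLoopK, dif_neg (by simp), pvShiftLoop, dif_neg (by norm_num)]
    | 1 =>
      have hy1 : ((2 ^ k * 1 : Nat) : Int) - 1 = ((2 ^ k * 1 - 1 : Nat) : Int) := by
        have := Nat.two_pow_pos k
        omega
      rw [pvLoopK, dif_neg, pvShiftLoop, dif_neg (by norm_num)]
      rw [hy1, PySem.Int.band_natCast, pvLand_pred k 1 (by norm_num)]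
      simp
    | (m' + 2) =>
      by_cases ho : (m' + 2) % 2 = 1
      · -- odd m ≥ 3: the loop fires at bit k
        have hp : 0 < 2 ^ k := Nat.two_pow_pos k
        have hy1 : ((2 ^ k * (m' + 2) : Nat) : Int) - 1 = ((2 ^ k * (m' + 2) - 1 : Nat) : Int) := by
          have : 0 < 2 ^ k * (m' + 2) := by positivity
          omega
        have hband : PySem.Int.band ((2 ^ k * (m' + 2) : Nat) : Int) (((2 ^ k * (m' + 2) : Nat) : Int) - 1)
            = ((2 ^ k * (m' + 1) : Nat) : Int) := by
          rw [hy1, PySem.Int.band_natCast, pvLand_pred k (m' + 2) ho]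
          norm_num
        have hxor : PySem.Int.bxor ((2 ^ k * (m' + 2) : Nat) : Int) ((2 ^ k * (m' + 1) : Nat) : Int)
            = ((2 ^ k : Nat) : Int) := by
          have hx2 := pvXor_pred k (m' + 2) ho
          norm_num at hx2
          rw [PySem.Int.bxor_natCast, hx2]
        rw [pvLoopK]
        rw [dif_pos ⟨by positivity, by rw [hband]; exact Int.natCast_ne_zero.mpr (by positivity)⟩]
        rw [hband, hxor, pvBitLength_two_pow]
        simp only [Nat.add_sub_cancel]
        rw [hshift]
        -- recurse: 2^k*(m'+1) = 2^(k+1) * ((m'+2)/2)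
        have harg : (2 ^ k * (m' + 1) : Nat) = 2 ^ (k + 1) * ((m' + 2) / 2) := by
          have h1 : (m' + 2) / 2 * 2 = m' + 1 := by omega
          rw [pow_succ]
          calc 2 ^ k * (m' + 1) = 2 ^ k * ((m' + 2) / 2 * 2) := by rw [h1]
            _ = 2 ^ k * 2 * ((m' + 2) / 2) := by ring
        rw [harg, ih ((m' + 2) / 2) (by omega) (k + 1) _ (pvShift_step x k (m' + 2) hshift)]
        rw [pvShiftLoop_nat (m' + 2) (by omega), if_pos ho]
      · -- even m ≥ 2: same state seen one bit higher
        have he : (m' + 2) % 2 = 0 := by omega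
        have harg : (2 ^ k * (m' + 2) : Nat) = 2 ^ (k + 1) * ((m' + 2) / 2) := by
          have h1 : (m' + 2) / 2 * 2 = m' + 2 := by omega
          rw [pow_succ]
          calc 2 ^ k * (m' + 2) = 2 ^ k * ((m' + 2) / 2 * 2) := by rw [h1]
            _ = 2 ^ k * 2 * ((m' + 2) / 2) := by ring
        rw [harg, ih ((m' + 2) / 2) (by omega) (k + 1) _ (pvShift_step x k (m' + 2) hshift)]
        rw [pvShiftLoop_nat (m' + 2) (by omega), if_neg ho]

-- ===== VERDICT (by name: the statement is the Claim_ definition above) =====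
theorem make_one_encoding_spec : Claim_equal_make_one_encoding := by
  intro x padding _ hpre
  unfold Spec_make_one_encoding make_one_encoding make_one_encoding_alt
  obtain ⟨k, hk⟩ := pvString_shape x padding hpre
  rw [hk, pvLoop_main x.toNat k PySem.Set.empty]
  have hx : ((x.toNat : Nat) : Int) = x := Int.toNat_of_nonneg hpre
  have hb := pvLoopK_eq x x.toNat 0 PySem.Set.empty (by simpa [Int.shiftRight_zero] using hx.symm)
  simp only [pow_zero, one_mul] at hb
  rw [← hb, hx]
  rfl
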